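-- pv_equiv track=rewrite | github.com/ldunekac/LMDAOC2022 | day15/day15.py | get_num_positions_where_beacons_caonnot_exist
-- ===== SOURCE A (Python) =====
-- def in_combined_ranges(ranges, val):
--     for x0, x1 in ranges:
--         if x0 <= val <= x1:
--             return True
--     return False
--
-- def get_num_positions_where_beacons_caonnot_exist(sensors, beacons, test_y):
--     ranges = []
--     for s, b in zip(sensors, beacons):
--         steps_to_x = abs(s[0] - b[0])
--         steps_to_y = abs(s[1] - b[1])
--         total_distance = steps_to_x + steps_to_y
--
--         dist_from_sensor_to_test_y = abs(s[1] - test_y)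
--         numer_of_spaces_to_go = total_distance - dist_from_sensor_to_test_y
--         if numer_of_spaces_to_go > 0:
--             ranges.append((s[0] - numer_of_spaces_to_go, s[0] + numer_of_spaces_to_go))
--
--     ranges = sorted(ranges, key=lambda x: x[0])
--     combined_ranges = []
--     start_range = None
--     end_range = None
--     for ind, r in enumerate(ranges):
--         if ind == 0:
--             start_range = r[0]
--             end_range = r[1]
--             continue
--         if r[0] <= end_range:
--             end_range = max(r[1], end_range)
--         else:
--             combined_ranges.append((start_range, end_range))
--             start_range = r[0]
--             end_range = r[1]
--     combined_ranges.append((start_range, end_range))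
--     total_len = sum([x1 - x0 + 1 for x0, x1 in combined_ranges])
--     for b in set(beacons):
--         if b[1] == test_y:
--             if in_combined_ranges(combined_ranges, b[0]):
--                 total_len -= 1
--     return total_len
-- ===== SOURCE B (Python) =====
-- def _union_size(ivs):
--     # size of the union of the (nonempty) integer intervals in ivs, by
--     # subtract-and-recurse: count the first interval, clip it out of the rest.
--     if not ivs:
--         return 0
--     (lo, hi), rest = ivs[0], ivs[1:]
--     pieces = []
--     for a, b in rest:
--         if a < lo:
--             pieces.append((a, min(b, lo - 1)))
--         if b > hi:
--             pieces.append((max(a, hi + 1), b))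
--     return (hi - lo + 1) + _union_size(pieces)
--
-- def get_num_positions_where_beacons_caonnot_exist(sensors, beacons, test_y):
--     ivs = [(sx - n, sx + n)
--            for (sx, sy), (bx, by) in zip(sensors, beacons)
--            for n in [abs(sx - bx) + abs(sy - by) - abs(sy - test_y)]
--            if n > 0]
--     total = _union_size(ivs)
--     for bx, by in set(beacons):
--         if by == test_y and any(lo <= bx <= hi for lo, hi in ivs):
--             total -= 1
--     return total
-- ===== Notes on version B (the rewrite author's own statement) =====
-- stated objective: alternative
-- what changed: B replaces A's sort + interval-merge sweep by an unsorted subtract-and-recurse union count (count the first interval, clip it out of the remaining intervals, recurse) and tests row beacons against the raw intervals instead of A's merged list.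
-- outside the precondition, e.g. on get_num_positions_where_beacons_caonnot_exist([], [], 0): A raises TypeError, B returns 0
-- crash fix: When no (sensor,beacon) pair covers row test_y (every coverage margin is <= 0, e.g. empty input lists), A raises TypeError via None-arithmetic on its empty range list, while B returns 0. — e.g. on get_num_positions_where_beacons_caonnot_exist([], [], 0): A raises TypeError, B returns 0
import Mathlib
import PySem

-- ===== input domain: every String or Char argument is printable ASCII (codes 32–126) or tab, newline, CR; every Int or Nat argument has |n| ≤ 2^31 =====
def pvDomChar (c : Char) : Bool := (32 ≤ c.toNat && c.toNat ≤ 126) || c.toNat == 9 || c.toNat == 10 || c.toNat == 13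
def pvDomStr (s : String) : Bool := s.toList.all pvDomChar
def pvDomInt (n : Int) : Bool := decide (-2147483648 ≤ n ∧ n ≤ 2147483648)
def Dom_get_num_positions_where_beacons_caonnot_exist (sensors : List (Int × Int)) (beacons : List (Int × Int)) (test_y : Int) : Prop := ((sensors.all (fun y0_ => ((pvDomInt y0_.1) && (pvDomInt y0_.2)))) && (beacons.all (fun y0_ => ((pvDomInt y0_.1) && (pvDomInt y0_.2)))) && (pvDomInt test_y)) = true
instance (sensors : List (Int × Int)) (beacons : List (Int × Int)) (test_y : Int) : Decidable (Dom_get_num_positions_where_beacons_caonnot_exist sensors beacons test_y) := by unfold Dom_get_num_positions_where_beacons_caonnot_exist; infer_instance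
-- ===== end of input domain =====

-- B computes the covered-row length by subtract-and-recurse (count the first interval, clip it
-- out of the rest, recurse) with no sorting and no interval merging, and tests beacons against
-- the raw intervals; same result wherever A returns (Pre_); where A raises TypeError (no range
-- covers the row) B returns 0 (Raises_ block).


-- shared arithmetic helpers (the sensor-to-beacon margin and the covered range on row test_y;
-- both Pythons compute these same expressions)
def pvMargin (sb : (Int × Int) × (Int × Int)) (test_y : Int) : Int :=
  |sb.1.1 - sb.2.1| + |sb.1.2 - sb.2.2| - |sb.1.2 - test_y|

def pvCover (sb : (Int × Int) × (Int × Int)) (test_y : Int) : Int × Int :=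
  (sb.1.1 - pvMargin sb test_y, sb.1.1 + pvMargin sb test_y)

-- ===== PORT A =====
-- Python helper in_combined_ranges
def in_combined_ranges (ranges : List (Int × Int)) (val : Int) : Bool :=
  match ranges with
  | [] => false
  | (x0, x1) :: rest => if x0 ≤ val ∧ val ≤ x1 then true else in_combined_ranges rest val

-- A's merge loop over the sorted ranges (state: combined list, start_range, end_range)
def pvMergeA : List (Int × Int) → List (Int × Int) → Int → Int → (List (Int × Int) × Int × Int)
  | [], acc, s, e => (acc, s, e)
  | (r0, r1) :: rest, acc, s, e =>
      if r0 ≤ e then pvMergeA rest acc s (max r1 e)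
      else pvMergeA rest (acc ++ [(s, e)]) r0 r1

def get_num_positions_where_beacons_caonnot_exist (sensors : List (Int × Int)) (beacons : List (Int × Int)) (test_y : Int) : Int :=
  let ranges := (sensors.zip beacons).foldl
    (fun acc sb => if 0 < pvMargin sb test_y then acc ++ [pvCover sb test_y] else acc) []
  let ranges := PySem.List.sorted ranges (fun r => r.1) false
  match ranges with
  | [] => 0  -- Python raises TypeError here (start_range/end_range stay None); excluded by Pre_
  | (s0, e0) :: rest =>
      let m := pvMergeA rest [] s0 e0
      let combined := m.1 ++ [(m.2.1, m.2.2)]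
      let total := (combined.map (fun r => r.2 - r.1 + 1)).sum
      (PySem.Set.ofList beacons).foldl
        (fun t b => if b.2 = test_y then
            (if in_combined_ranges combined b.1 then t - 1 else t) else t) total

-- ===== PORT B =====
-- body of B's clipping loop: the (at most two) nonempty parts of r outside [lo, hi]
def pvClipStep (lo hi : Int) (acc : List (Int × Int)) (r : Int × Int) : List (Int × Int) :=
  let acc := if r.1 < lo then acc ++ [(r.1, min r.2 (lo - 1))] else acc
  if hi < r.2 then acc ++ [(max r.1 (hi + 1), r.2)] else acc

-- B's _union_size; the Nat fuel only makes the recursion total (Python recurses unboundedly),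
-- pvFuel below always suffices on the nonempty intervals B feeds it
def pvUnionSize : Nat → List (Int × Int) → Int
  | 0, _ => 0
  | _ + 1, [] => 0
  | fuel + 1, (lo, hi) :: rest =>
      (hi - lo + 1) + pvUnionSize fuel (rest.foldl (pvClipStep lo hi) [])

def pvFuel (ivs : List (Int × Int)) : Nat :=
  (ivs.map (fun r => (r.2 - r.1 + 1).toNat)).sum + 1

def get_num_positions_where_beacons_caonnot_exist_alt (sensors : List (Int × Int)) (beacons : List (Int × Int)) (test_y : Int) : Int :=
  let ivs := ((sensors.zip beacons).filter (fun sb => decide (0 < pvMargin sb test_y))).map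
      (fun sb => pvCover sb test_y)
  let total := pvUnionSize (pvFuel ivs) ivs
  (PySem.Set.ofList beacons).foldl
    (fun t b => if b.2 = test_y ∧ (ivs.any fun r => decide (r.1 ≤ b.1 ∧ b.1 ≤ r.2)) = true
                then t - 1 else t) total

-- ===== PRECONDITION & SPEC =====
-- Pre_ excludes exactly the inputs where A raises TypeError: no zipped (sensor,beacon) pair
-- has a positive margin on row test_y, so A's range list is empty and it sums None-tuples.
def Pre_get_num_positions_where_beacons_caonnot_exist (sensors : List (Int × Int)) (beacons : List (Int × Int)) (test_y : Int) : Prop :=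
  ∃ sb ∈ sensors.zip beacons, 0 < |sb.1.1 - sb.2.1| + |sb.1.2 - sb.2.2| - |sb.1.2 - test_y|
instance (sensors : List (Int × Int)) (beacons : List (Int × Int)) (test_y : Int) : Decidable (Pre_get_num_positions_where_beacons_caonnot_exist sensors beacons test_y) := by unfold Pre_get_num_positions_where_beacons_caonnot_exist; infer_instance

def pvWitness_get_num_positions_where_beacons_caonnot_exist : (List (Int × Int)) × (List (Int × Int)) × Int :=
  ([(0, 0)], [(2, 0)], 0)

-- When no (sensor,beacon) pair covers row test_y, A raises TypeError while B returns 0.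
def Raises_get_num_positions_where_beacons_caonnot_exist (sensors : List (Int × Int)) (beacons : List (Int × Int)) (test_y : Int) : Prop :=
  ∀ sb ∈ sensors.zip beacons, |sb.1.1 - sb.2.1| + |sb.1.2 - sb.2.2| - |sb.1.2 - test_y| ≤ 0
instance (sensors : List (Int × Int)) (beacons : List (Int × Int)) (test_y : Int) : Decidable (Raises_get_num_positions_where_beacons_caonnot_exist sensors beacons test_y) := by unfold Raises_get_num_positions_where_beacons_caonnot_exist; infer_instance
def pvRaiseWitness_get_num_positions_where_beacons_caonnot_exist : (List (Int × Int)) × (List (Int × Int)) × Int := ([], [], 0)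
def pvRaiseWitnessOut_get_num_positions_where_beacons_caonnot_exist : Int := 0

def Spec_get_num_positions_where_beacons_caonnot_exist (sensors : List (Int × Int)) (beacons : List (Int × Int)) (test_y : Int) (out : Int) : Prop := out = get_num_positions_where_beacons_caonnot_exist_alt sensors beacons test_y
instance (sensors : List (Int × Int)) (beacons : List (Int × Int)) (test_y : Int) (out : Int) : Decidable (Spec_get_num_positions_where_beacons_caonnot_exist sensors beacons test_y out) := by unfold Spec_get_num_positions_where_beacons_caonnot_exist; infer_instance

-- ===== CLAIM (what is proved, stated in full; the proofs are below) =====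
def Claim_equal_get_num_positions_where_beacons_caonnot_exist : Prop := ∀ (sensors : List (Int × Int)) (beacons : List (Int × Int)) (test_y : Int), Dom_get_num_positions_where_beacons_caonnot_exist sensors beacons test_y → Pre_get_num_positions_where_beacons_caonnot_exist sensors beacons test_y → Spec_get_num_positions_where_beacons_caonnot_exist sensors beacons test_y (get_num_positions_where_beacons_caonnot_exist sensors beacons test_y)
def Claim_raises_get_num_positions_where_beacons_caonnot_exist : Prop := (∀ (sensors : List (Int × Int)) (beacons : List (Int × Int)) (test_y : Int), Dom_get_num_positions_where_beacons_caonnot_exist sensors beacons test_y → Raises_get_num_positions_where_beacons_caonnot_exist sensors beacons test_y → ¬ Pre_get_num_positions_where_beacons_caonnot_exist sensors beacons test_y) ∧ (Dom_get_num_positions_where_beacons_caonnot_exist (pvRaiseWitness_get_num_positions_where_beacons_caonnot_exist.1) (pvRaiseWitness_get_num_positions_where_beacons_caonnot_exist.2.1) (pvRaiseWitness_get_num_positions_where_beacons_caonnot_exist.2.2) ∧ Raises_get_num_positions_where_beacons_caonnot_exist (pvRaiseWitness_get_num_positions_where_beacons_caonnot_exist.1) (pvRaiseWitness_get_num_positions_where_beacons_caonnot_exist.2.1)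 (pvRaiseWitness_get_num_positions_where_beacons_caonnot_exist.2.2) ∧ get_num_positions_where_beacons_caonnot_exist_alt (pvRaiseWitness_get_num_positions_where_beacons_caonnot_exist.1) (pvRaiseWitness_get_num_positions_where_beacons_caonnot_exist.2.1) (pvRaiseWitness_get_num_positions_where_beacons_caonnot_exist.2.2) = pvRaiseWitnessOut_get_num_positions_where_beacons_caonnot_exist)

-- ===== LEMMAS AND PROOFS =====

-- the set of integers covered by a list of intervals (proof-side semantics both totals equal)
noncomputable def pvCovered : List (Int × Int) → Finset Int
  | [] => ∅
  | r :: rest => Finset.Icc r.1 r.2 ∪ pvCovered rest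

lemma mem_pvCovered (I : List (Int × Int)) (x : Int) :
    x ∈ pvCovered I ↔ ∃ r ∈ I, r.1 ≤ x ∧ x ≤ r.2 := by
  induction I with
  | nil => simp [pvCovered]
  | cons r rest ih =>
      simp only [pvCovered, Finset.mem_union, Finset.mem_Icc, ih, List.mem_cons]
      constructor
      · rintro (h | ⟨q, hq, h⟩)
        exacts [⟨r, Or.inl rfl, h⟩, ⟨q, Or.inr hq, h⟩]
      · rintro ⟨q, (rfl | hq), h⟩
        exacts [Or.inl h, Or.inr ⟨q, hq, h⟩]

lemma pvCovered_append : ∀ (l₁ l₂ : List (Int × Int)),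
    pvCovered (l₁ ++ l₂) = pvCovered l₁ ∪ pvCovered l₂ := by
  intro l₁ l₂
  induction l₁ with
  | nil => simp [pvCovered]
  | cons r rest ih => simp [pvCovered, ih, Finset.union_assoc]

-- proof-side flattened form of A's merge loop (the merged list it finally produces)
def pvMFlat : List (Int × Int) → Int → Int → List (Int × Int)
  | [], s, e => [(s, e)]
  | (r0, r1) :: rest, s, e =>
      if r0 ≤ e then pvMFlat rest s (max r1 e)
      else (s, e) :: pvMFlat rest r0 r1

lemma pvMergeA_flat : ∀ (rest acc : List (Int × Int)) (s e : Int),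
    (pvMergeA rest acc s e).1 ++ [((pvMergeA rest acc s e).2.1, (pvMergeA rest acc s e).2.2)]
      = acc ++ pvMFlat rest s e := by
  intro rest
  induction rest with
  | nil => intro acc s e; simp [pvMergeA, pvMFlat]
  | cons r rest ih =>
      intro acc s e
      obtain ⟨r0, r1⟩ := r
      by_cases h : r0 ≤ e
      · simp [pvMergeA, pvMFlat, h, ih]
      · simp [pvMergeA, pvMFlat, h, ih]

-- A's merged-interval sum is the cardinality of the covered set
lemma pvMFlat_sum : ∀ (rest : List (Int × Int)) (s e : Int),
    rest.Pairwise (fun a b => a.1 ≤ b.1) →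
    (∀ r ∈ rest, s ≤ r.1) →
    s ≤ e →
    (∀ r ∈ rest, r.1 ≤ r.2) →
    ((pvMFlat rest s e).map (fun r => r.2 - r.1 + 1)).sum
      = ((pvCovered ((s, e) :: rest)).card : Int) := by
  intro rest
  induction rest with
  | nil =>
      intro s e _ _ hse _
      simp [pvMFlat, pvCovered, Int.card_Icc]
      omega
  | cons r rest ih =>
      intro s e hpw hlb hse hval
      obtain ⟨r0, r1⟩ := r
      have hpw' := (List.pairwise_cons.mp hpw).2
      have hr0lb := (List.pairwise_cons.mp hpw).1
      have hlb0 : s ≤ r0 := hlb (r0, r1) (by simp)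
      have hv : r0 ≤ r1 := hval (r0, r1) (by simp)
      have hval' : ∀ x ∈ rest, x.1 ≤ x.2 := fun x hx => hval x (by simp [hx])
      by_cases h : r0 ≤ e
      · have hunion : Finset.Icc s e ∪ Finset.Icc r0 r1 = Finset.Icc s (max r1 e) := by
          ext x; simp only [Finset.mem_union, Finset.mem_Icc]; omega
        have hlb' : ∀ x ∈ rest, s ≤ x.1 := fun x hx => hlb x (by simp [hx])
        simp only [pvMFlat, h, if_pos]
        rw [ih s (max r1 e) hpw' hlb' (le_trans hse (le_max_right r1 e)) hval']
        simp only [pvCovered]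
        rw [← Finset.union_assoc, hunion]
      · simp only [pvMFlat, h, if_neg, not_false_iff, List.map_cons, List.sum_cons]
        rw [ih r0 r1 hpw' hr0lb hv hval']
        show e - s + 1 + _ = ((Finset.Icc s e ∪ pvCovered ((r0, r1) :: rest)).card : Int)
        have hdisj : Disjoint (Finset.Icc s e) (pvCovered ((r0, r1) :: rest)) := by
          rw [Finset.disjoint_left]
          intro x hx hx'
          rw [Finset.mem_Icc] at hx
          rw [mem_pvCovered] at hx'
          obtain ⟨q, hq, hq1, hq2⟩ := hx'
          have : r0 ≤ q.1 := by
            rcases List.mem_cons.mp hq with heq | hq'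
            · rw [heq]
            · exact hr0lb q hq'
          omega
        rw [Finset.card_union_of_disjoint hdisj]
        have : ((Finset.Icc s e).card : Int) = e - s + 1 := by
          rw [Int.card_Icc]; omega
        push_cast
        omega

-- membership in the merged list = membership in some raw interval
lemma pvMFlat_mem : ∀ (rest : List (Int × Int)) (s e val : Int),
    rest.Pairwise (fun a b => a.1 ≤ b.1) →
    (∀ r ∈ rest, s ≤ r.1) →
    (∀ r ∈ rest, r.1 ≤ r.2) →
    (in_combined_ranges (pvMFlat rest s e) val = true
      ↔ (s ≤ val ∧ val ≤ e) ∨ ∃ r ∈ rest, r.1 ≤ val ∧ val ≤ r.2) := by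
  intro rest
  induction rest with
  | nil => intro s e val _ _ _; simp [pvMFlat, in_combined_ranges]
  | cons r rest ih =>
      intro s e val hpw hlb hval
      obtain ⟨x0, x1⟩ := r
      have hpw' := (List.pairwise_cons.mp hpw).2
      have hlb0 : s ≤ x0 := hlb (x0, x1) (by simp)
      have hv : x0 ≤ x1 := hval (x0, x1) (by simp)
      have hval' : ∀ r ∈ rest, r.1 ≤ r.2 := fun r hr => hval r (by simp [hr])
      by_cases h : x0 ≤ e
      · have hlb' : ∀ r ∈ rest, s ≤ r.1 := fun r hr => hlb r (by simp [hr])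
        simp only [pvMFlat, h, if_pos]
        rw [ih s (max x1 e) val hpw' hlb' hval']
        constructor
        · rintro (⟨h1, h2⟩ | ⟨r, hr, h1, h2⟩)
          · rcases le_total x1 e with h5 | h5
            · rw [show max x1 e = e from by omega] at h2
              exact Or.inl ⟨h1, h2⟩
            · rw [show max x1 e = x1 from by omega] at h2
              by_cases h3 : val ≤ e
              · exact Or.inl ⟨h1, h3⟩
              · exact Or.inr ⟨(x0, x1), by simp, by omega, h2⟩
          · exact Or.inr ⟨r, by simp [hr], h1, h2⟩
        · rintro (⟨h1, h2⟩ | ⟨r, hr, h1, h2⟩)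
          · exact Or.inl ⟨h1, le_trans h2 (le_max_right x1 e)⟩
          · rcases List.mem_cons.mp hr with heq | hr'
            · rw [heq] at h1 h2
              exact Or.inl ⟨le_trans hlb0 h1, le_trans h2 (le_max_left x1 e)⟩
            · exact Or.inr ⟨r, hr', h1, h2⟩
      · have hlb' : ∀ r ∈ rest, x0 ≤ r.1 :=
          fun r hr => (List.pairwise_cons.mp hpw).1 r hr
        simp only [pvMFlat, h, if_neg, not_false_iff]
        show (if s ≤ val ∧ val ≤ e then true else in_combined_ranges (pvMFlat rest x0 x1) val) = true ↔ _
        by_cases hin : s ≤ val ∧ val ≤ e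
        · rw [if_pos hin]
          exact ⟨fun _ => Or.inl hin, fun _ => rfl⟩
        · rw [if_neg hin, ih x0 x1 val hpw' hlb' hval']
          constructor
          · rintro (⟨h1, h2⟩ | ⟨r, hr, h1, h2⟩)
            · exact Or.inr ⟨(x0, x1), by simp, h1, h2⟩
            · exact Or.inr ⟨r, by simp [hr], h1, h2⟩
          · rintro (habs | ⟨r, hr, h1, h2⟩)
            · exact absurd habs hin
            · rcases List.mem_cons.mp hr with heq | hr'
              · rw [heq] at h1 h2; exact Or.inl ⟨h1, h2⟩
              · exact Or.inr ⟨r, hr', h1, h2⟩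

-- one clip step covers exactly the part of r outside [lo, hi]
lemma mem_pvClipStep (lo hi : Int) (acc : List (Int × Int)) (r : Int × Int) (x : Int) :
    x ∈ pvCovered (pvClipStep lo hi acc r)
      ↔ x ∈ pvCovered acc ∨ (r.1 ≤ x ∧ x ≤ r.2 ∧ ¬(lo ≤ x ∧ x ≤ hi)) := by
  obtain ⟨a, b⟩ := r
  unfold pvClipStep
  by_cases hP : x ∈ pvCovered acc <;>
    by_cases h1 : a < lo <;> by_cases h2 : hi < b <;>
      simp only [h1, h2, if_true, if_false, pvCovered_append, pvCovered,
        Finset.mem_union, Finset.mem_Icc, Finset.notMem_empty, or_false, hP,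
        true_or, false_or, false_iff] <;>
      omega

-- the clipping loop covers exactly (covered rest) \ [lo, hi]  (plus the accumulator)
lemma mem_pvClipFold : ∀ (rest acc : List (Int × Int)) (lo hi x : Int),
    x ∈ pvCovered (rest.foldl (pvClipStep lo hi) acc)
      ↔ x ∈ pvCovered acc ∨ (x ∈ pvCovered rest ∧ ¬(lo ≤ x ∧ x ≤ hi)) := by
  intro rest
  induction rest with
  | nil => intro acc lo hi x; simp [pvCovered]
  | cons r rest ih =>
      intro acc lo hi x
      rw [List.foldl_cons, ih, mem_pvClipStep]
      show _ ↔ _ ∨ (x ∈ Finset.Icc r.1 r.2 ∪ pvCovered rest ∧ _)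
      simp only [Finset.mem_union, Finset.mem_Icc]
      tauto

-- the clipping loop keeps intervals nonempty
lemma pvClipFold_nonempty : ∀ (rest acc : List (Int × Int)) (lo hi : Int),
    (∀ r ∈ acc, r.1 ≤ r.2) → (∀ r ∈ rest, r.1 ≤ r.2) →
    ∀ p ∈ rest.foldl (pvClipStep lo hi) acc, p.1 ≤ p.2 := by
  intro rest
  induction rest with
  | nil => intro acc lo hi hacc _; exact hacc
  | cons r rest ih =>
      intro acc lo hi hacc hval
      rw [List.foldl_cons]
      refine ih _ lo hi ?_ (fun q hq => hval q (by simp [hq]))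
      have hr : r.1 ≤ r.2 := hval r (by simp)
      intro p hp
      have hp' : p ∈ acc ∨ (r.1 < lo ∧ p = (r.1, min r.2 (lo - 1)))
          ∨ (hi < r.2 ∧ p = (max r.1 (hi + 1), r.2)) := by
        unfold pvClipStep at hp
        by_cases h1 : r.1 < lo <;> by_cases h2 : hi < r.2 <;>
          simp only [h1, h2, if_true, if_false, List.mem_append, List.mem_singleton] at hp <;>
          tauto
      rcases hp' with h | ⟨h1, rfl⟩ | ⟨h2, rfl⟩
      · exact hacc p h
      · simp; omega
      · simp; omega

-- the clipping loop does not increase the total interval size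
lemma pvClipFold_size : ∀ (rest acc : List (Int × Int)) (lo hi : Int),
    lo ≤ hi → (∀ r ∈ rest, r.1 ≤ r.2) →
    ((rest.foldl (pvClipStep lo hi) acc).map (fun r => (r.2 - r.1 + 1).toNat)).sum
      ≤ (acc.map (fun r => (r.2 - r.1 + 1).toNat)).sum
        + (rest.map (fun r => (r.2 - r.1 + 1).toNat)).sum := by
  intro rest
  induction rest with
  | nil => intro acc lo hi _ _; simp
  | cons r rest ih =>
      intro acc lo hi hlohi hval
      rw [List.foldl_cons]
      have hr : r.1 ≤ r.2 := hval r (by simp)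
      have hstep : ((pvClipStep lo hi acc r).map (fun r => (r.2 - r.1 + 1).toNat)).sum
          ≤ (acc.map (fun r => (r.2 - r.1 + 1).toNat)).sum + (r.2 - r.1 + 1).toNat := by
        unfold pvClipStep
        by_cases h1 : r.1 < lo <;> by_cases h2 : hi < r.2 <;>
          simp only [h1, h2, if_true, if_false, List.map_append, List.sum_append,
            List.map_cons, List.map_nil, List.sum_cons, List.sum_nil] <;> omega
      calc ((rest.foldl (pvClipStep lo hi) (pvClipStep lo hi acc r)).map
              (fun r => (r.2 - r.1 + 1).toNat)).sum
          ≤ ((pvClipStep lo hi acc r).map (fun r => (r.2 - r.1 + 1).toNat)).sum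
            + (rest.map (fun r => (r.2 - r.1 + 1).toNat)).sum :=
            ih _ lo hi hlohi (fun q hq => hval q (by simp [hq]))
        _ ≤ _ := by simp only [List.map_cons, List.sum_cons]; omega

-- B's clip-and-recurse computes the cardinality of the covered set (given enough fuel)
lemma pvUnionSize_card : ∀ (fuel : Nat) (ivs : List (Int × Int)),
    (∀ r ∈ ivs, r.1 ≤ r.2) →
    (ivs.map (fun r => (r.2 - r.1 + 1).toNat)).sum < fuel →
    pvUnionSize fuel ivs = ((pvCovered ivs).card : Int) := by
  intro fuel
  induction fuel with
  | zero => intro ivs _ h; omega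
  | succ fuel ih =>
      intro ivs hval hfuel
      match ivs with
      | [] => simp [pvUnionSize, pvCovered]
      | (lo, hi) :: rest =>
          have hlohi : lo ≤ hi := hval (lo, hi) (by simp)
          have hval' : ∀ r ∈ rest, r.1 ≤ r.2 := fun r hr => hval r (by simp [hr])
          have hpieces_val := pvClipFold_nonempty rest [] lo hi (by simp) hval'
          have hsize := pvClipFold_size rest [] lo hi hlohi hval'
          simp only [List.map_nil, List.sum_nil, Nat.zero_add] at hsize
          have hfuel' : ((rest.foldl (pvClipStep lo hi) []).map
              (fun r => (r.2 - r.1 + 1).toNat)).sum < fuel := by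
            simp only [List.map_cons, List.sum_cons] at hfuel
            omega
          rw [pvUnionSize, ih _ hpieces_val hfuel']
          have hset : pvCovered (rest.foldl (pvClipStep lo hi) [])
              = pvCovered rest \ Finset.Icc lo hi := by
            ext x
            rw [mem_pvClipFold, Finset.mem_sdiff, Finset.mem_Icc]
            simp [pvCovered]
          rw [hset]
          show _ = ((Finset.Icc lo hi ∪ pvCovered rest).card : Int)
          have h1 : (pvCovered rest \ Finset.Icc lo hi).card + (Finset.Icc lo hi).card
              = (pvCovered rest ∪ Finset.Icc lo hi).card := Finset.card_sdiff_add_card _ _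
          rw [Finset.union_comm] at h1
          have h2 : ((Finset.Icc lo hi).card : Int) = hi - lo + 1 := by
            rw [Int.card_Icc]; omega
          omega

-- ===== VERDICT (by name: the statement is the Claim_ definition above) =====
theorem get_num_positions_where_beacons_caonnot_exist_spec : Claim_equal_get_num_positions_where_beacons_caonnot_exist := by
  intro sensors beacons test_y _ hpre
  unfold Spec_get_num_positions_where_beacons_caonnot_exist
  unfold get_num_positions_where_beacons_caonnot_exist get_num_positions_where_beacons_caonnot_exist_alt
  have hcongr : ∀ (acc : List (Int × Int)) (sb : (Int × Int) × (Int × Int)),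
      (if 0 < pvMargin sb test_y then acc ++ [pvCover sb test_y] else acc)
        = (if decide (0 < pvMargin sb test_y) = true then acc ++ [pvCover sb test_y] else acc) := by
    intro acc sb; simp
  simp only [hcongr]
  rw [PySem.List.foldl_append_if (p := fun sb => decide (0 < pvMargin sb test_y))
        (f := fun sb => pvCover sb test_y)]
  simp only [List.nil_append]
  set ivs := ((sensors.zip beacons).filter (fun sb => decide (0 < pvMargin sb test_y))).map
      (fun sb => pvCover sb test_y) with hivs
  set rs := PySem.List.sorted ivs (fun r : Int × Int => r.1) false with hrs
  have hvalivs : ∀ r ∈ ivs, r.1 ≤ r.2 := by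
    intro r hr
    rw [hivs] at hr
    obtain ⟨sb, hsb, rfl⟩ := List.mem_map.mp hr
    have := List.of_mem_filter hsb
    simp only [decide_eq_true_eq] at this
    simp [pvCover]; omega
  have hval : ∀ r ∈ rs, r.1 ≤ r.2 := by
    intro r hr
    rw [hrs, PySem.List.mem_sorted] at hr
    exact hvalivs r hr
  have hpw : rs.Pairwise (fun a b => a.1 ≤ b.1) := by
    rw [hrs]; exact PySem.List.sorted_pairwise _ _
  have hne : rs ≠ [] := by
    rw [hrs, Ne, PySem.List.sorted_eq_nil_iff]
    obtain ⟨sb, hsb, hm⟩ := hpre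
    have : pvCover sb test_y ∈ ivs := by
      rw [hivs]
      refine List.mem_map.mpr ⟨sb, List.mem_filter.mpr ⟨hsb, ?_⟩, rfl⟩
      simp [pvMargin]; omega
    intro hcon; rw [hcon] at this; simp at this
  obtain ⟨⟨s0, e0⟩, rest, hcons⟩ := List.exists_cons_of_ne_nil hne
  rw [hcons]
  have hv0 : s0 ≤ e0 := hval (s0, e0) (by rw [hcons]; simp)
  have hvrest : ∀ r ∈ rest, r.1 ≤ r.2 := fun r hr => hval r (by rw [hcons]; simp [hr])
  have hpwrest : rest.Pairwise (fun a b => a.1 ≤ b.1) := by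
    rw [hcons] at hpw; exact (List.pairwise_cons.mp hpw).2
  have hlbrest : ∀ r ∈ rest, s0 ≤ r.1 := by
    rw [hcons] at hpw; exact (List.pairwise_cons.mp hpw).1
  -- the two covered sets coincide (rs is a reordering of ivs)
  have hsets : pvCovered rs = pvCovered ivs := by
    ext x
    rw [mem_pvCovered, mem_pvCovered]
    constructor <;> rintro ⟨r, hr, h1, h2⟩
    · exact ⟨r, (PySem.List.mem_sorted _ _ _ _).mp hr, h1, h2⟩
    · exact ⟨r, (PySem.List.mem_sorted _ _ _ _).mpr hr, h1, h2⟩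
  -- totals agree
  have htot : ((((pvMergeA rest [] s0 e0).1 ++
        [((pvMergeA rest [] s0 e0).2.1, (pvMergeA rest [] s0 e0).2.2)]).map
          (fun r => r.2 - r.1 + 1)).sum)
      = pvUnionSize (pvFuel ivs) ivs := by
    rw [pvMergeA_flat rest [] s0 e0, List.nil_append]
    rw [pvMFlat_sum rest s0 e0 hpwrest hlbrest hv0 hvrest]
    rw [pvUnionSize_card (pvFuel ivs) ivs hvalivs (by unfold pvFuel; omega)]
    rw [← hcons, hsets]
  -- membership tests agree
  have hmem : ∀ (v : Int),
      in_combined_ranges ((pvMergeA rest [] s0 e0).1 ++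
        [((pvMergeA rest [] s0 e0).2.1, (pvMergeA rest [] s0 e0).2.2)]) v
      = (ivs.any fun r => decide (r.1 ≤ v ∧ v ≤ r.2)) := by
    intro v
    rw [pvMergeA_flat rest [] s0 e0, List.nil_append]
    have hiff := pvMFlat_mem rest s0 e0 v hpwrest hlbrest hvrest
    have hany : (ivs.any fun r => decide (r.1 ≤ v ∧ v ≤ r.2)) = true
        ↔ (s0 ≤ v ∧ v ≤ e0) ∨ ∃ r ∈ rest, r.1 ≤ v ∧ v ≤ r.2 := by
      constructor
      · intro h
        rcases List.any_eq_true.mp h with ⟨r, hr, hc⟩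
        simp only [decide_eq_true_eq] at hc
        have hr' : r ∈ rs := (PySem.List.mem_sorted _ _ _ _).mpr hr
        rw [hcons] at hr'
        rcases List.mem_cons.mp hr' with heq | hr''
        · rw [heq] at hc; exact Or.inl hc
        · exact Or.inr ⟨r, hr'', hc⟩
      · rintro (⟨h1, h2⟩ | ⟨r, hr, h1, h2⟩)
        · refine List.any_eq_true.mpr ⟨(s0, e0), ?_, by simp; omega⟩
          have h0 : (s0, e0) ∈ rs := by rw [hcons]; simp
          exact (PySem.List.mem_sorted _ _ _ _).mp h0
        · refine List.any_eq_true.mpr ⟨r, ?_, by simp; omega⟩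
          have h0 : r ∈ rs := by rw [hcons]; simp [hr]
          exact (PySem.List.mem_sorted _ _ _ _).mp h0
    rw [Bool.eq_iff_iff, hiff, hany]
  rw [← htot]
  apply PySem.List.foldl_congr_mem
  intro acc b _
  by_cases hb : b.2 = test_y
  · rw [hmem b.1]
    by_cases hany : ((ivs.any fun r => decide (r.1 ≤ b.1 ∧ b.1 ≤ r.2)) = true)
    · rw [if_pos hb, if_pos hany, if_pos (And.intro hb hany)]
    · rw [if_pos hb, if_neg hany, if_neg (fun hc => hany hc.2)]
  · rw [if_neg hb, if_neg (fun hc => hb hc.1)]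

theorem get_num_positions_where_beacons_caonnot_exist_raises : Claim_raises_get_num_positions_where_beacons_caonnot_exist := by
  unfold Claim_raises_get_num_positions_where_beacons_caonnot_exist
  constructor
  · intro sensors beacons test_y _ hr hpre
    obtain ⟨sb, hsb, hm⟩ := hpre
    exact absurd (hr sb hsb) (by omega)
  · exact ⟨by decide, by decide, by decide⟩

-- self-check consuming the theorem above: at the recorded raise witness, Raises_ holds and B's port returns the recorded value
theorem get_num_positions_where_beacons_caonnot_exist_raises_witness :
    Raises_get_num_positions_where_beacons_caonnot_exist [] [] 0 ∧
      get_num_positions_where_beacons_caonnot_exist_alt [] [] 0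
        = pvRaiseWitnessOut_get_num_positions_where_beacons_caonnot_exist :=
  ⟨get_num_positions_where_beacons_caonnot_exist_raises.2.2.1,
   get_num_positions_where_beacons_caonnot_exist_raises.2.2.2⟩
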